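-- pv_equiv track=rewrite | github.com/timosachsenberg/NuXLDIA | nuxl2dia.py | _insert_modification_at_position
-- ===== SOURCE A (Python) =====
-- def _insert_modification_at_position(sequence: str, aa: str, mod: str,
--                                       target_pos: int) -> str:
--     """Insert a modification at the correct amino acid position."""
--     # Count amino acids (ignoring brackets and their contents)
--     result = []
--     aa_count = 0
--     i = 0
--     inserted = False
--
--     while i < len(sequence):
--         char = sequence[i]
--
--         if char == '[':
--             # Skip bracket content
--             end = sequence.find(']', i)
--             result.append(sequence[i:end+1])
--             i = end + 1
--         elif char == '(':
--             # Skip parenthesis content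
--             end = sequence.find(')', i)
--             result.append(sequence[i:end+1])
--             i = end + 1
--         elif char.isupper():
--             result.append(char)
--             aa_count += 1
--
--             # Check if we should insert the modification here
--             if aa_count == target_pos + 1 and char == aa and not inserted:
--                 # Check if next char is already a modification
--                 if i + 1 < len(sequence) and sequence[i + 1] not in '([':
--                     result.append(f'({mod})')
--                     inserted = True
--                 elif i + 1 >= len(sequence):
--                     result.append(f'({mod})')
--                     inserted = True
--
--             i += 1
--         else:
--             result.append(char)
--             i += 1
--
--     return ''.join(result)
-- ===== SOURCE B (Python) =====
-- def _tokenize(sequence):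
--     """Lex the sequence into bracket groups '[...]', paren groups '(...)' and single chars.
--     An opener with no closer after it is treated as a plain single character."""
--     tokens = []
--     i = 0
--     n = len(sequence)
--     while i < n:
--         c = sequence[i]
--         j = -1
--         if c == '[':
--             j = sequence.find(']', i + 1)
--         elif c == '(':
--             j = sequence.find(')', i + 1)
--         if j == -1:
--             tokens.append(c)
--             i += 1
--         else:
--             tokens.append(sequence[i:j + 1])
--             i = j + 1
--     return tokens
--
--
-- def _insert_modification_at_position(sequence: str, aa: str, mod: str,
--                                      target_pos: int) -> str:
--     tokens = _tokenize(sequence)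
--     out = []
--     aa_count = 0
--     for idx, tok in enumerate(tokens):
--         out.append(tok)
--         if len(tok) == 1 and tok.isupper():
--             aa_count += 1
--             if aa_count == target_pos + 1 and tok == aa:
--                 if idx + 1 >= len(tokens) or tokens[idx + 1][0] not in '([':
--                     out.append('(' + mod + ')')
--     return ''.join(out)
-- ===== Notes on version B (the rewrite author's own statement) =====
-- stated objective: alternative
-- what changed: Replaces A's single-pass index-jumping state machine (with an inserted flag and in-loop find/slice index arithmetic) by a two-pass lex-then-transform design: first tokenize the sequence into bracket groups, paren groups and single characters, then a simple flag-free pass over the token list with token-level lookahead.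
-- outside the precondition, e.g. on _insert_modification_at_position('[(]', 'A', 'm', 0): A returns '[(]', B returns '[(]'; on _insert_modification_at_position('(', 'A', 'm', 0): A does not finish within the time limit, B returns '('
import Mathlib
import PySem

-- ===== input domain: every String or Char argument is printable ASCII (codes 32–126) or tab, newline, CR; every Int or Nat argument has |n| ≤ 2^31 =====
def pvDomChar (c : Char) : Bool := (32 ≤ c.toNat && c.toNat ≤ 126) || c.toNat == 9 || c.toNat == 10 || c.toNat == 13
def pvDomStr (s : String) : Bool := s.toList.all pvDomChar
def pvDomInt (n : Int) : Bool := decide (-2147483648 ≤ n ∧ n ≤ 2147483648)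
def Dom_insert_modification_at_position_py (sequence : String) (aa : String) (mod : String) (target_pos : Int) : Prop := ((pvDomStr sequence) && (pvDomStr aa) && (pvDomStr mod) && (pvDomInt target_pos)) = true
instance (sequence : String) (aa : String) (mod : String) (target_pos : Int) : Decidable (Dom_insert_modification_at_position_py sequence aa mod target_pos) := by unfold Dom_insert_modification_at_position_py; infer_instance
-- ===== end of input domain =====

-- B replaces A's single-pass index-jumping state machine by a two-pass lex-then-transform design
-- (tokenize into bracket/paren groups and single chars, then one flag-free pass with token lookahead);
-- same cost, different decomposition.

-- ===== PORT A =====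
-- A's while loop over the string, transliterated: i, aa_count, inserted and the result list are the
-- loop state; the index i is an Int exactly as in Python.  The Nat `fuel` only makes the recursion
-- total: on inputs where an opener has no closer after it, Python's `find` returns -1, i resets to 0
-- and A loops forever (such inputs are excluded by Pre_ below); whenever Python terminates, i grows
-- by at least 1 per iteration, so fuel = len+1 is never exhausted.
def pvLoopA (l : List Char) (aa mod : String) (tp : Int) :
    Nat → Int → Int → Bool → List String → List String
  | 0, _, _, _, acc => acc
  | fuel+1, i, cnt, ins, acc =>
    match PySem.List.pyGet? l i with
    | none => acc                                      -- while condition i < len fails (i ≥ 0 always here)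
    | some ch =>
      if ch = '[' then
        let e := PySem.Chars.findFrom l [']'] i        -- sequence.find(']', i)
        pvLoopA l aa mod tp fuel (e+1) cnt ins (acc ++ [String.ofList (PySem.List.slice l (some i) (some (e+1)))])
      else if ch = '(' then
        let e := PySem.Chars.findFrom l [')'] i        -- sequence.find(')', i)
        pvLoopA l aa mod tp fuel (e+1) cnt ins (acc ++ [String.ofList (PySem.List.slice l (some i) (some (e+1)))])
      else if PySem.Chars.isupper ch then
        if cnt + 1 = tp + 1 ∧ String.ofList [ch] = aa ∧ ins = false then
          -- Python: insert if (i+1 < len and s[i+1] not in '([') or i+1 >= len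
          match PySem.List.pyGet? l (i+1) with
          | some nx =>
            if nx = '(' ∨ nx = '[' then
              pvLoopA l aa mod tp fuel (i+1) (cnt+1) ins (acc ++ [String.ofList [ch]])
            else
              pvLoopA l aa mod tp fuel (i+1) (cnt+1) true (acc ++ [String.ofList [ch], String.ofList ('(' :: mod.toList ++ [')'])])
          | none =>
              pvLoopA l aa mod tp fuel (i+1) (cnt+1) true (acc ++ [String.ofList [ch], String.ofList ('(' :: mod.toList ++ [')'])])
        else
          pvLoopA l aa mod tp fuel (i+1) (cnt+1) ins (acc ++ [String.ofList [ch]])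
      else
        pvLoopA l aa mod tp fuel (i+1) cnt ins (acc ++ [String.ofList [ch]])

def insert_modification_at_position_py (sequence : String) (aa : String) (mod : String) (target_pos : Int) : String :=
  PySem.Str.join "" (pvLoopA sequence.toList aa mod target_pos (sequence.toList.length + 1) 0 0 false [])

-- ===== PORT B =====
-- Source B's _tokenize: split off everything up to the first closer; returns (content, rest-after-closer).
def pvSplitFirst (c : Char) : List Char → Option (List Char × List Char)
  | [] => none
  | x :: rest =>
    if x = c then some ([], rest)
    else
      match pvSplitFirst c rest with
      | some (pre, post) => some (x :: pre, post)
      | none => none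

-- used by pvTok's termination proof (cited in decreasing_by)
theorem pvSplitFirst_eq (c : Char) : ∀ (m pre post : List Char),
    pvSplitFirst c m = some (pre, post) → m = pre ++ c :: post ∧ c ∉ pre := by
  intro m
  induction m with
  | nil => intro pre post h; simp [pvSplitFirst] at h
  | cons x rest ih =>
    intro pre post h
    by_cases hx : x = c
    · simp [pvSplitFirst, hx] at h
      obtain ⟨h1, h2⟩ := h
      subst h1; subst h2; subst hx; simp
    · simp [pvSplitFirst, hx] at h
      cases hs : pvSplitFirst c rest with
      | none => rw [hs] at h; simp at h
      | some pr =>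
        rw [hs] at h
        obtain ⟨pre', post'⟩ := pr
        simp at h
        obtain ⟨h1, h2⟩ := h
        obtain ⟨hm, hnp⟩ := ih pre' post' hs
        subst h1; subst h2
        constructor
        · simp [hm]
        · simp
          exact ⟨fun hxc => hx hxc.symm, hnp⟩

theorem pvSplitFirst_len (c : Char) (m pre post : List Char)
    (h : pvSplitFirst c m = some (pre, post)) : post.length < m.length := by
  have := (pvSplitFirst_eq c m pre post h).1
  subst this; simp; omega

-- Source B's tokenizer: '[...]' group, '(...)' group, or a single character (an opener with no
-- closer after it is a plain character).
def pvTok : List Char → List (List Char)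
  | [] => []
  | x :: rest =>
    if _hx : x = '[' then
      match hs : pvSplitFirst ']' rest with
      | some (pre, post) => ('[' :: pre ++ [']']) :: pvTok post
      | none => [x] :: pvTok rest
    else if _hx2 : x = '(' then
      match hs : pvSplitFirst ')' rest with
      | some (pre, post) => ('(' :: pre ++ [')']) :: pvTok post
      | none => [x] :: pvTok rest
    else [x] :: pvTok rest
termination_by m => m.length
decreasing_by
  · exact Nat.lt_succ_of_lt (pvSplitFirst_len ']' rest pre post hs)
  · simp
  · exact Nat.lt_succ_of_lt (pvSplitFirst_len ')' rest pre post hs)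
  · simp
  · simp

-- lookahead on the token list: next token absent or not starting with '(' or '['
def pvNextOkTok : List (List Char) → Bool
  | [] => true
  | u :: _ =>
    match u with
    | c0 :: _ => !(c0 == '(' || c0 == '[')
    | [] => true

-- Source B's transform pass over the token list
def pvProcB (aa mod : String) (tp : Int) : List (List Char) → Int → List String
  | [], _ => []
  | t :: ts, cnt =>
    match t with
    | [c] =>
      if PySem.Chars.isupper c then
        if cnt + 1 = tp + 1 ∧ String.ofList [c] = aa ∧ pvNextOkTok ts = true then
          String.ofList [c] :: String.ofList ('(' :: mod.toList ++ [')']) :: pvProcB aa mod tp ts (cnt+1)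
        else
          String.ofList [c] :: pvProcB aa mod tp ts (cnt+1)
      else
        String.ofList [c] :: pvProcB aa mod tp ts cnt
    | _ => String.ofList t :: pvProcB aa mod tp ts cnt

def insert_modification_at_position_py_alt (sequence : String) (aa : String) (mod : String) (target_pos : Int) : String :=
  PySem.Str.join "" (pvProcB aa mod target_pos (pvTok sequence.toList) 0)

-- ===== PRECONDITION & SPEC =====
-- every occurrence of the opener o has an occurrence of the closer c somewhere after it
def pvOpensClosed (o c : Char) : List Char → Bool
  | [] => true
  | x :: rest => (if x = o then rest.contains c else true) && pvOpensClosed o c rest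

-- Pre_ excludes sequences containing a '[' with no ']' after it or a '(' with no ')' after it: on
-- those A's scanner can hit find(...) == -1, reset i to 0 and loop forever.  This over-approximates
-- the diverging set slightly: it also excludes unmatched openers hidden inside a matched group
-- (e.g. "[(]"), on which A returns and B returns the same value.
def Pre_insert_modification_at_position_py (sequence : String) (aa : String) (mod : String) (target_pos : Int) : Prop :=
  (pvOpensClosed '[' ']' sequence.toList && pvOpensClosed '(' ')' sequence.toList) = true
instance (sequence : String) (aa : String) (mod : String) (target_pos : Int) : Decidable (Pre_insert_modification_at_position_py sequence aa mod target_pos) := by unfold Pre_insert_modification_at_position_py; infer_instance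

def pvWitness_insert_modification_at_position_py : String × String × String × Int := ("PEPTIDE", "E", "Phospho", 1)

def Spec_insert_modification_at_position_py (sequence : String) (aa : String) (mod : String) (target_pos : Int) (out : String) : Prop := out = insert_modification_at_position_py_alt sequence aa mod target_pos
instance (sequence : String) (aa : String) (mod : String) (target_pos : Int) (out : String) : Decidable (Spec_insert_modification_at_position_py sequence aa mod target_pos out) := by unfold Spec_insert_modification_at_position_py; infer_instance

-- ===== CLAIM (what is proved, stated in full; the proofs are below) =====
def Claim_equal_insert_modification_at_position_py : Prop := ∀ (sequence : String) (aa : String) (mod : String) (target_pos : Int), Dom_insert_modification_at_position_py sequence aa mod target_pos → Pre_insert_modification_at_position_py sequence aa mod target_pos → Spec_insert_modification_at_position_py sequence aa mod target_pos (insert_modification_at_position_py sequence aa mod target_pos)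

-- ===== LEMMAS AND PROOFS =====

theorem pvOpensClosed_drop (o c : Char) (l : List Char) (h : pvOpensClosed o c l = true) :
    ∀ k, pvOpensClosed o c (l.drop k) = true := by
  induction l with
  | nil => intro k; simpa using h
  | cons x rest ih =>
    simp only [pvOpensClosed, Bool.and_eq_true] at h
    intro k
    cases k with
    | zero => simp only [List.drop_zero, pvOpensClosed, Bool.and_eq_true]; exact ⟨h.1, h.2⟩
    | succ k => simpa using ih h.2 k

theorem pvSplitFirst_none_iff (c : Char) (m : List Char) :
    pvSplitFirst c m = none ↔ c ∉ m := by
  induction m with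
  | nil => simp [pvSplitFirst]
  | cons x rest ih =>
    by_cases hx : x = c
    · subst hx; simp [pvSplitFirst]
    · have hstep : pvSplitFirst c (x :: rest) = none ↔ pvSplitFirst c rest = none := by
        cases hs : pvSplitFirst c rest with
        | none => simp [pvSplitFirst, hx, hs]
        | some pr => obtain ⟨pre, post⟩ := pr; simp [pvSplitFirst, hx, hs]
      rw [hstep, ih]
      constructor
      · intro h hm
        rcases List.mem_cons.mp hm with h1 | h1
        · exact hx h1.symm
        · exact h h1
      · intro h hm; exact h (List.mem_cons_of_mem _ hm)

theorem pvSplitFirst_of_decomp (c : Char) (pre post : List Char) (hnp : c ∉ pre) :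
    pvSplitFirst c (pre ++ c :: post) = some (pre, post) := by
  induction pre with
  | nil => simp [pvSplitFirst]
  | cons p pre' ih =>
    have hp : p ≠ c := fun h => hnp (by simp [h])
    have hnp' : c ∉ pre' := fun h => hnp (by simp [h])
    simp [pvSplitFirst, hp, ih hnp']

theorem pvSingleton_prefix (c : Char) (m : List Char) : [c] <+: m ↔ m.head? = some c := by
  cases m with
  | nil => simp
  | cons x t => simp [List.cons_prefix_cons, eq_comm]

theorem pvFind_of_split (c : Char) (m pre post : List Char)
    (h : pvSplitFirst c m = some (pre, post)) :
    PySem.Chars.find m [c] = (pre.length : Int) := by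
  obtain ⟨hm, hnp⟩ := pvSplitFirst_eq c m pre post h
  have hpos : 0 ≤ PySem.Chars.find m [c] := by
    rw [PySem.Chars.find_nonneg_iff]
    exact ⟨pre, post, by rw [hm]; simp⟩
  obtain ⟨hpref, hmin⟩ := PySem.Chars.find_spec hpos
  have hat : [c] <+: m.drop pre.length := by
    rw [hm, List.drop_left]
    exact ⟨post, rfl⟩
  have hnot : ∀ j < pre.length, ¬ [c] <+: m.drop j := by
    intro j hj hp
    rw [pvSingleton_prefix, List.head?_drop] at hp
    have hpe : m[j]? = pre[j]? := by
      rw [hm]; exact List.getElem?_append_left hj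
    rw [hpe] at hp
    exact hnp (List.mem_of_getElem? hp)
  have hk1 : ¬ (PySem.Chars.find m [c]).toNat < pre.length := fun hlt => hnot _ hlt hpref
  have hk2 : ¬ pre.length < (PySem.Chars.find m [c]).toNat := fun hlt => hmin _ hlt hat
  omega

theorem pvGroupData (o c : Char) (hoc : o ≠ c) (l : List Char) (i : Nat)
    (hi : i < l.length) (hil : l[i] = o) (hg : pvOpensClosed o c l = true) :
    ∃ pre post, pvSplitFirst c (l.drop (i+1)) = some (pre, post) ∧
      PySem.Chars.findFrom l [c] (i : Int) = (i : Int) + 1 + pre.length ∧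
      PySem.List.slice l (some (i : Int)) (some ((i : Int) + 1 + pre.length + 1)) = o :: pre ++ [c] ∧
      l.drop (i + pre.length + 2) = post := by
  have hdropi : l.drop i = o :: l.drop (i+1) := by
    rw [List.drop_eq_getElem_cons hi, hil]
  have hgood : pvOpensClosed o c (l.drop i) = true := pvOpensClosed_drop o c l hg i
  rw [hdropi] at hgood
  simp only [pvOpensClosed, Bool.and_eq_true] at hgood
  have hmem : c ∈ l.drop (i+1) := by
    have := hgood.1
    simpa using this
  obtain ⟨pp, hs⟩ : ∃ pr, pvSplitFirst c (l.drop (i+1)) = some pr := by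
    cases hsp : pvSplitFirst c (l.drop (i+1)) with
    | none => exact absurd ((pvSplitFirst_none_iff c _).mp hsp) (by simpa using hmem)
    | some pr => exact ⟨pr, rfl⟩
  obtain ⟨pre, post⟩ := pp
  have hdec := pvSplitFirst_eq c _ pre post hs
  have h2 : l.drop i = (o :: pre ++ [c]) ++ post := by
    rw [hdropi, hdec.1]; simp
  have hfind : PySem.Chars.find (l.drop i) [c] = ((pre.length : Int) + 1) := by
    have hsp2 : pvSplitFirst c (l.drop i) = some (o :: pre, post) := by
      rw [hdropi, hdec.1]
      simp [pvSplitFirst, hoc, pvSplitFirst_of_decomp c pre post hdec.2]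
    have := pvFind_of_split c _ _ _ hsp2
    simpa [add_comm] using this
  refine ⟨pre, post, hs, ?_, ?_, ?_⟩
  · rw [PySem.Chars.findFrom_natCast l [c] i (le_of_lt hi), hfind]
    have hne : ((pre.length : Int) + 1) ≠ -1 := by omega
    rw [if_neg hne]
    ring
  · have hcast : ((i : Int) + 1 + pre.length + 1) = ((i + pre.length + 2 : Nat) : Int) := by
      push_cast; ring
    rw [hcast, PySem.List.slice_natCast]
    have harith : i + pre.length + 2 - i = pre.length + 2 := by omega
    rw [harith, h2]
    have hlen : pre.length + 2 = (o :: pre ++ [c]).length := by simp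
    rw [hlen]
    exact List.take_left
  · have hd : l.drop (i + pre.length + 2) = (l.drop i).drop (pre.length + 2) := by
      rw [List.drop_drop]
      exact congrArg (fun n => List.drop n l) (by omega)
    rw [hd, h2]
    have hlen : pre.length + 2 = (o :: pre ++ [c]).length := by simp
    rw [hlen]
    exact List.drop_left

theorem pvNextOkTok_tok (m : List Char) :
    pvNextOkTok (pvTok m) = (match m.head? with
                             | some c0 => !(c0 == '(' || c0 == '[')
                             | none => true) := by
  cases m with
  | nil => simp [pvTok, pvNextOkTok]
  | cons x rest =>
    by_cases hx : x = '['
    · subst hx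
      rw [pvTok]
      cases hs : pvSplitFirst ']' rest with
      | none => simp [pvNextOkTok]
      | some pr => obtain ⟨pre, post⟩ := pr; simp [pvNextOkTok]
    · by_cases hx2 : x = '('
      · subst hx2
        rw [pvTok]
        cases hs : pvSplitFirst ')' rest with
        | none => simp [pvNextOkTok]
        | some pr => obtain ⟨pre, post⟩ := pr; simp [pvNextOkTok]
      · rw [pvTok]
        simp [hx, hx2, pvNextOkTok]

theorem pvProcB_long (aa mod : String) (tp : Int) (c d : Char) (r : List Char)
    (ts : List (List Char)) (cnt : Int) :
    pvProcB aa mod tp ((c :: d :: r) :: ts) cnt = String.ofList (c :: d :: r) :: pvProcB aa mod tp ts cnt := by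
  rfl

theorem pvCast_succ (i : Nat) : (i : Int) + 1 = ((i + 1 : Nat) : Int) := by push_cast; ring

theorem pvTok_bracket (rest pre post : List Char) (hs : pvSplitFirst ']' rest = some (pre, post)) :
    pvTok ('[' :: rest) = ('[' :: pre ++ [']']) :: pvTok post := by
  rw [pvTok]
  simp only [reduceDIte]
  split
  · rename_i pre' post' heq
    rw [hs] at heq
    simp only [Option.some.injEq, Prod.mk.injEq] at heq
    obtain ⟨h1, h2⟩ := heq
    subst h1; subst h2
    rfl
  · rename_i heq
    rw [hs] at heq
    simp at heq

theorem pvTok_paren (rest pre post : List Char) (hs : pvSplitFirst ')' rest = some (pre, post)) :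
    pvTok ('(' :: rest) = ('(' :: pre ++ [')']) :: pvTok post := by
  rw [pvTok, dif_neg (show ¬('(' = '[') from by decide), dif_pos rfl]
  split
  · rename_i pre' post' heq
    rw [hs] at heq
    simp only [Option.some.injEq, Prod.mk.injEq] at heq
    obtain ⟨h1, h2⟩ := heq
    subst h1; subst h2
    rfl
  · rename_i heq
    rw [hs] at heq
    simp at heq

theorem pvTok_single (x : Char) (rest : List Char) (hx1 : x ≠ '[') (hx2 : x ≠ '(') :
    pvTok (x :: rest) = [x] :: pvTok rest := by
  rw [pvTok]; simp [hx1, hx2]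

theorem pvProcB_single (aa mod : String) (tp : Int) (c : Char) (ts : List (List Char)) (cnt : Int) :
    pvProcB aa mod tp ([c] :: ts) cnt =
      (if PySem.Chars.isupper c then
         if cnt + 1 = tp + 1 ∧ String.ofList [c] = aa ∧ pvNextOkTok ts = true then
           String.ofList [c] :: String.ofList ('(' :: mod.toList ++ [')']) :: pvProcB aa mod tp ts (cnt+1)
         else String.ofList [c] :: pvProcB aa mod tp ts (cnt+1)
       else String.ofList [c] :: pvProcB aa mod tp ts cnt) := rfl

-- the main loop invariant: A's scan from index i equals B's transform of the tokens of drop i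
theorem pvMain (l : List Char) (aa mod : String) (tp : Int)
    (hg1 : pvOpensClosed '[' ']' l = true) (hg2 : pvOpensClosed '(' ')' l = true) :
    ∀ (fuel : Nat) (i : Nat) (cnt : Int) (ins : Bool) (acc : List String),
      l.length - i ≤ fuel → (ins = true → tp + 1 ≤ cnt) →
      pvLoopA l aa mod tp fuel (i : Int) cnt ins acc
        = acc ++ pvProcB aa mod tp (pvTok (l.drop i)) cnt := by
  intro fuel
  induction fuel generalizing hg1 hg2 with
  | zero =>
    intro i cnt ins acc hfuel hins
    rw [List.drop_eq_nil_of_le (by omega)]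
    simp [pvLoopA, pvTok, pvProcB]
  | succ fuel ih =>
    intro i cnt ins acc hfuel hins
    by_cases hi : i < l.length
    · have hdropi : l.drop i = l[i] :: l.drop (i+1) := List.drop_eq_getElem_cons hi
      have hget : PySem.List.pyGet? l (i : Int) = some l[i] := by
        rw [PySem.List.pyGet?_natCast, List.getElem?_eq_getElem hi]
      by_cases h1 : l[i] = '['
      · obtain ⟨pre, post, hs, hf, hsl, hdp⟩ := pvGroupData '[' ']' (by decide) l i hi h1 hg1
        obtain ⟨d, r, hdr⟩ : ∃ d r, pre ++ [']'] = d :: r := by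
          cases pre with
          | nil => exact ⟨']', [], rfl⟩
          | cons a t => exact ⟨a, t ++ [']'], rfl⟩
        have hcast : (i : Int) + 1 + (pre.length : Int) + 1 = ((i + pre.length + 2 : Nat) : Int) := by
          push_cast; ring
        rw [hcast] at hsl
        have hLHS : pvLoopA l aa mod tp (fuel+1) (i : Int) cnt ins acc
            = pvLoopA l aa mod tp fuel ((i + pre.length + 2 : Nat) : Int) cnt ins
                (acc ++ [String.ofList ('[' :: pre ++ [']'])]) := by
          rw [pvLoopA, hget]
          simp only [h1, hf, hcast, hsl]
          simp
        rw [hLHS, ih hg1 hg2 (i + pre.length + 2) cnt ins _ (by omega) hins, hdp]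
        rw [hdropi, h1, pvTok_bracket _ _ _ hs]
        rw [show ('[' :: pre ++ [']']) = '[' :: (pre ++ [']']) from rfl, hdr, pvProcB_long, ← hdr]
        simp
      · by_cases h2 : l[i] = '('
        · obtain ⟨pre, post, hs, hf, hsl, hdp⟩ := pvGroupData '(' ')' (by decide) l i hi h2 hg2
          obtain ⟨d, r, hdr⟩ : ∃ d r, pre ++ [')'] = d :: r := by
            cases pre with
            | nil => exact ⟨')', [], rfl⟩
            | cons a t => exact ⟨a, t ++ [')'], rfl⟩
          have hcast : (i : Int) + 1 + (pre.length : Int) + 1 = ((i + pre.length + 2 : Nat) : Int) := by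
            push_cast; ring
          rw [hcast] at hsl
          have hLHS : pvLoopA l aa mod tp (fuel+1) (i : Int) cnt ins acc
              = pvLoopA l aa mod tp fuel ((i + pre.length + 2 : Nat) : Int) cnt ins
                  (acc ++ [String.ofList ('(' :: pre ++ [')'])]) := by
            rw [pvLoopA, hget]
            simp only [h2, hf, hcast, hsl]
            simp
          rw [hLHS, ih hg1 hg2 (i + pre.length + 2) cnt ins _ (by omega) hins, hdp]
          rw [hdropi, h2, pvTok_paren _ _ _ hs]
          rw [show ('(' :: pre ++ [')']) = '(' :: (pre ++ [')']) from rfl, hdr, pvProcB_long, ← hdr]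
          simp
        · have htokstep : pvTok (l.drop i) = [l[i]] :: pvTok (l.drop (i+1)) := by
            rw [hdropi, pvTok_single _ _ h1 h2]
          have hnx : pvNextOkTok (pvTok (l.drop (i+1)))
              = (match l[i+1]? with
                 | some c0 => !(c0 == '(' || c0 == '[')
                 | none => true) := by
            rw [pvNextOkTok_tok, List.head?_drop]
          have hgetn : PySem.List.pyGet? l ((i : Int) + 1) = l[i+1]? := by
            rw [pvCast_succ, PySem.List.pyGet?_natCast]
          by_cases h3 : PySem.Chars.isupper l[i] = true
          · by_cases hC : cnt + 1 = tp + 1 ∧ String.ofList [l[i]] = aa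
            · have hinsf : ins = false := by
                cases ins with
                | false => rfl
                | true => exact absurd (hins rfl) (by omega)
              subst hinsf
              cases hnxv : l[i+1]? with
              | some nx =>
                by_cases hnb : nx = '(' ∨ nx = '['
                · have hnoB : pvNextOkTok (pvTok (l.drop (i+1))) = false := by
                    rw [hnx, hnxv]
                    rcases hnb with h | h <;> simp [h]
                  have hLHS : pvLoopA l aa mod tp (fuel+1) (i : Int) cnt false acc
                      = pvLoopA l aa mod tp fuel ((i+1 : Nat) : Int) (cnt+1) false
                          (acc ++ [String.ofList [l[i]]]) := by
                    rw [pvLoopA]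
                    simp only [hget]
                    rw [if_neg h1, if_neg h2, if_pos h3,
                        if_pos (show cnt + 1 = tp + 1 ∧ String.ofList [l[i]] = aa ∧ True from ⟨hC.1, hC.2, trivial⟩)]
                    simp only [hgetn, hnxv]
                    rw [if_pos hnb, pvCast_succ]
                  rw [hLHS, ih hg1 hg2 (i+1) (cnt+1) false _ (by omega) (by simp)]
                  rw [htokstep, pvProcB_single, if_pos h3,
                      if_neg (fun hcon => by simp [hnoB] at hcon)]
                  simp
                · have hnb2 : nx ≠ '(' ∧ nx ≠ '[' :=
                    ⟨fun h => hnb (Or.inl h), fun h => hnb (Or.inr h)⟩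
                  have hyesB : pvNextOkTok (pvTok (l.drop (i+1))) = true := by
                    rw [hnx, hnxv]
                    simp [hnb2.1, hnb2.2]
                  have hLHS : pvLoopA l aa mod tp (fuel+1) (i : Int) cnt false acc
                      = pvLoopA l aa mod tp fuel ((i+1 : Nat) : Int) (cnt+1) true
                          (acc ++ [String.ofList [l[i]], String.ofList ('(' :: mod.toList ++ [')'])]) := by
                    rw [pvLoopA]
                    simp only [hget]
                    rw [if_neg h1, if_neg h2, if_pos h3,
                        if_pos (show cnt + 1 = tp + 1 ∧ String.ofList [l[i]] = aa ∧ True from ⟨hC.1, hC.2, trivial⟩)]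
                    simp only [hgetn, hnxv]
                    rw [if_neg hnb, pvCast_succ]
                  rw [hLHS, ih hg1 hg2 (i+1) (cnt+1) true _ (by omega) (fun _ => by omega)]
                  rw [htokstep, pvProcB_single, if_pos h3, if_pos ⟨hC.1, hC.2, hyesB⟩]
                  simp
              | none =>
                have hyesB : pvNextOkTok (pvTok (l.drop (i+1))) = true := by
                  rw [hnx, hnxv]
                have hLHS : pvLoopA l aa mod tp (fuel+1) (i : Int) cnt false acc
                    = pvLoopA l aa mod tp fuel ((i+1 : Nat) : Int) (cnt+1) true
                        (acc ++ [String.ofList [l[i]], String.ofList ('(' :: mod.toList ++ [')'])]) := by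
                  rw [pvLoopA]
                  simp only [hget]
                  rw [if_neg h1, if_neg h2, if_pos h3,
                      if_pos (show cnt + 1 = tp + 1 ∧ String.ofList [l[i]] = aa ∧ True from ⟨hC.1, hC.2, trivial⟩)]
                  simp only [hgetn, hnxv]
                  rw [pvCast_succ]
                rw [hLHS, ih hg1 hg2 (i+1) (cnt+1) true _ (by omega) (fun _ => by omega)]
                rw [htokstep, pvProcB_single, if_pos h3, if_pos ⟨hC.1, hC.2, hyesB⟩]
                simp
            · have hCn : ¬ (cnt + 1 = tp + 1 ∧ String.ofList [l[i]] = aa ∧ ins = false) :=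
                fun hcon => hC ⟨hcon.1, hcon.2.1⟩
              have hCn' : ¬ (cnt + 1 = tp + 1 ∧ String.ofList [l[i]] = aa ∧
                  pvNextOkTok (pvTok (l.drop (i+1))) = true) :=
                fun hcon => hC ⟨hcon.1, hcon.2.1⟩
              have hLHS : pvLoopA l aa mod tp (fuel+1) (i : Int) cnt ins acc
                  = pvLoopA l aa mod tp fuel ((i+1 : Nat) : Int) (cnt+1) ins
                      (acc ++ [String.ofList [l[i]]]) := by
                rw [pvLoopA]
                simp only [hget]
                rw [if_neg h1, if_neg h2, if_pos h3, if_neg hCn, pvCast_succ]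
              rw [hLHS, ih hg1 hg2 (i+1) (cnt+1) ins _ (by omega)
                    (fun h => le_trans (hins h) (by omega))]
              rw [htokstep, pvProcB_single, if_pos h3, if_neg hCn']
              simp
          · have htokstep : pvTok (l.drop i) = [l[i]] :: pvTok (l.drop (i+1)) := by
              rw [hdropi, pvTok_single _ _ h1 h2]
            have hLHS : pvLoopA l aa mod tp (fuel+1) (i : Int) cnt ins acc
                = pvLoopA l aa mod tp fuel ((i+1 : Nat) : Int) cnt ins
                    (acc ++ [String.ofList [l[i]]]) := by
              rw [pvLoopA]
              simp only [hget]
              rw [if_neg h1, if_neg h2, if_neg h3, pvCast_succ]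
            rw [hLHS, ih hg1 hg2 (i+1) cnt ins _ (by omega) hins]
            rw [htokstep, pvProcB_single, if_neg h3]
            simp
    · have hget : PySem.List.pyGet? l (i : Int) = none := by
        rw [PySem.List.pyGet?_natCast, List.getElem?_eq_none (by omega)]
      rw [List.drop_eq_nil_of_le (by omega), pvLoopA]
      simp only [hget]
      simp [pvTok, pvProcB]

-- ===== VERDICT (by name: the statement is the Claim_ definition above) =====
theorem insert_modification_at_position_py_spec : Claim_equal_insert_modification_at_position_py := by
  intro sequence aa mod tp _ hpre
  unfold Spec_insert_modification_at_position_py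
  unfold insert_modification_at_position_py insert_modification_at_position_py_alt
  unfold Pre_insert_modification_at_position_py at hpre
  simp only [Bool.and_eq_true] at hpre
  have h := pvMain sequence.toList aa mod tp hpre.1 hpre.2
      (sequence.toList.length + 1) 0 0 false [] (by omega) (by simp)
  simp only [Nat.cast_zero] at h
  rw [h]
  simp
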